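-- pv_equiv track=rewrite | github.com/dckallos/simple-crypto-trader-poc | gpt_manager.py | _sanitize_text_block
-- ===== SOURCE A (Python) =====
-- def _sanitize_text_block(text: str) -> str:
--     """
--     Removes/obscures terms that might be flagged for policy reasons, e.g.
--     'financial advice', 'guarantee', 'profit', or any strongly directive phrases.
--     Adjust the forbidden list as needed.
--     """
--     forbidden_words = [
--         "financial advice", "financial", "guarantee",
--         "profit", "money", "trading signals", "investment",
--         "get rich", "day-trading"
--     ]
--     sanitized = text
--     for fw in forbidden_words:
--         if fw.lower() in sanitized.lower():
--             # e.g. replace with '*' or remove entirely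
--             sanitized = sanitized.replace(fw, "***")
--     return sanitized
-- ===== SOURCE B (Python) =====
-- _FORBIDDEN = [
--     "financial advice", "financial", "guarantee",
--     "profit", "money", "trading signals", "investment",
--     "get rich", "day-trading",
-- ]
--
-- def _sanitize_text_block(text: str) -> str:
--     # Single left-to-right scan: at each position try the forbidden words in
--     # priority (list) order; on a match emit "***" and jump past it, else copy
--     # one character.  One pass over the text instead of nine full-string
--     # replace passes (plus their lowercase copies).
--     out = []
--     i = 0
--     n = len(text)
--     while i < n:
--         for fw in _FORBIDDEN:
--             if text.startswith(fw, i):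
--                 out.append("***")
--                 i += len(fw)
--                 break
--         else:
--             out.append(text[i])
--             i += 1
--     return "".join(out)
-- ===== Notes on version B (the rewrite author's own statement) =====
-- stated objective: alternative
-- what changed: Replaces the nine sequential whole-string replace passes (each preceded by a lowercase-copy containment guard) with one left-to-right scan that at each position tries the forbidden words in priority order, emits the three-asterisk mask on a match and jumps past it; Pre_ excludes texts containing one of the five substrings in which two different forbidden words overlap, where which word gets masked is an accidental consequence of A's fixed iteration order (B masks the leftmost word).
-- outside the precondition, e.g. on _sanitize_text_block('day-tradinguarantee'): A returns 'day-tradin***', B returns '***uarantee'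
import Mathlib
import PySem

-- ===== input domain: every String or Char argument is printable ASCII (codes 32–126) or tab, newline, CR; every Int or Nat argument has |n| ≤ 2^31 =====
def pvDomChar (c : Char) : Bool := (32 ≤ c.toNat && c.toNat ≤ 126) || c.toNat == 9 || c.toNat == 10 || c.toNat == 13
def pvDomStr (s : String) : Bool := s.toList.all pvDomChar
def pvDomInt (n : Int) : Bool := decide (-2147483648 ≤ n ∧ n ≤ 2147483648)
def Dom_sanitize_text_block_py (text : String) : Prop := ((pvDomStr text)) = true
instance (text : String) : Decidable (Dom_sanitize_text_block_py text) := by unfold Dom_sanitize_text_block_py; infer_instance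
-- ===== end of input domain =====

-- B replaces A's nine sequential whole-string replace passes (each behind a lowercase
-- containment guard) by ONE left-to-right scan that at each position tries the forbidden
-- words in priority order; Pre_ excludes texts where two different forbidden words overlap,
-- there which word gets masked is an accident of A's iteration order.

-- ===== PORT A =====
-- literal port of A: for each forbidden word, if fw.lower() in sanitized.lower(),
-- sanitized = sanitized.replace(fw, "***")
def sanitize_text_block_py (text : String) : String :=
  let forbidden_words : List String :=
    ["financial advice", "financial", "guarantee",
     "profit", "money", "trading signals", "investment",
     "get rich", "day-trading"]
  forbidden_words.foldl
    (fun sanitized fw =>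
      if PySem.Str.isIn (PySem.Str.lower fw) (PySem.Str.lower sanitized) then
        PySem.Str.replace sanitized fw "***"
      else sanitized)
    text

-- ===== PORT B =====
-- B's module-level word list (Source B's _FORBIDDEN)
def pvForbiddenB : List String :=
  ["financial advice", "financial", "guarantee",
   "profit", "money", "trading signals", "investment",
   "get rich", "day-trading"]

-- port of Source B's while loop: at each position try the words in order (first match
-- wins: emit "***" and jump past it), else copy one character; the fuel parameter is
-- the remaining length (each iteration consumes at least one character), mirroring
-- the loop's progress on i.
def pvScanGo (ws : List (List Char)) : Nat → List Char → List Char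
  | _, [] => []
  | 0, _ :: _ => []
  | fuel+1, c :: t =>
    match List.find? (fun w => w.isPrefixOf (c :: t)) ws with
    | some w => '*' :: '*' :: '*' :: pvScanGo ws fuel (List.drop w.length (c :: t))
    | none => c :: pvScanGo ws fuel t

def sanitize_text_block_py_alt (text : String) : String :=
  String.ofList (pvScanGo (pvForbiddenB.map String.toList) text.toList.length text.toList)

-- ===== PRECONDITION & SPEC =====
-- the five substrings in which two distinct forbidden words overlap
def pvCollisions : List String :=
  ["day-trading signals", "day-tradinget rich", "day-tradinguarantee",
   "investmentrading signals", "profitrading signals"]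

-- Pre_ excludes texts containing one of the five substrings in which two different
-- forbidden words overlap: there which word gets masked is an accidental consequence
-- of A's fixed iteration order (A masks the higher-priority word, B the leftmost one),
-- and both choices are defensible.
def Pre_sanitize_text_block_py (text : String) : Prop :=
  ∀ c ∈ pvCollisions, PySem.Str.isIn c text = false
instance (text : String) : Decidable (Pre_sanitize_text_block_py text) := by unfold Pre_sanitize_text_block_py; infer_instance

def pvWitness_sanitize_text_block_py : String := "profit and financial advice, Money!"

def Spec_sanitize_text_block_py (text : String) (out : String) : Prop := out = sanitize_text_block_py_alt text
instance (text : String) (out : String) : Decidable (Spec_sanitize_text_block_py text out) := by unfold Spec_sanitize_text_block_py; infer_instance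

-- ===== CLAIM (what is proved, stated in full; the proofs are below) =====
def Claim_equal_sanitize_text_block_py : Prop := ∀ (text : String), Dom_sanitize_text_block_py text → Pre_sanitize_text_block_py text → Spec_sanitize_text_block_py text (sanitize_text_block_py text)

-- ===== LEMMAS AND PROOFS =====

-- proof-side abbreviations
def pvMask : List Char := ['*', '*', '*']

def pvChain (ws : List (List Char)) (l : List Char) : List Char :=
  ws.foldl (fun s w => PySem.Chars.replace s w pvMask) l

-- "no collision substring occurs" at the character-list level
def pvOK (l : List Char) : Prop := ∀ c ∈ pvCollisions, ¬ c.toList <:+: l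

-- w is the higher-priority word, wk a later word: whenever wk could overlap a w
-- occurrence from the left (overlap length k), the resulting union string is one of
-- the listed collision substrings
def pvCross (w wk : List Char) : Prop :=
  ∀ k ∈ List.range wk.length, 1 ≤ k →
    (wk.drop (wk.length - k) <+: w ∨ w <+: wk.drop (wk.length - k)) →
    ∃ c ∈ pvCollisions, c.toList = wk ++ w.drop (min k w.length)

def pvGood (ws : List (List Char)) : Prop :=
  (∀ w ∈ ws, w ≠ [] ∧ '*' ∉ w) ∧ List.Pairwise pvCross ws

-- ---------- splitOn.go / replace.go infrastructure ----------

-- splitOn.go: the accumulator of finished pieces factors out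
theorem pv_splitgo_acc (sep : List Char) (fuel : Nat) : ∀ (l cur : List Char) (acc : List (List Char)),
    PySem.Chars.splitOn.go sep fuel l cur acc = acc.reverse ++ PySem.Chars.splitOn.go sep fuel l cur [] := by
  induction fuel with
  | zero => intro l cur acc; simp [PySem.Chars.splitOn.go]
  | succ fuel ih =>
    intro l cur acc
    cases l with
    | nil => simp [PySem.Chars.splitOn.go]
    | cons c t =>
      simp only [PySem.Chars.splitOn.go]
      by_cases h : sep.isPrefixOf (c :: t) = true
      · rw [if_pos h, if_pos h, ih _ [] (cur.reverse :: acc), ih _ [] [cur.reverse]]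
        simp
      · rw [if_neg h, if_neg h, ih t (c :: cur) acc]

-- splitOn.go never returns the empty list
theorem pv_splitgo_ne (sep : List Char) (fuel : Nat) (l cur : List Char) (acc : List (List Char)) :
    PySem.Chars.splitOn.go sep fuel l cur acc ≠ [] := by
  induction fuel generalizing l cur acc with
  | zero => simp [PySem.Chars.splitOn.go]
  | succ fuel ih =>
    cases l with
    | nil => simp [PySem.Chars.splitOn.go]
    | cons c t =>
      simp only [PySem.Chars.splitOn.go]
      by_cases h : sep.isPrefixOf (c :: t) = true
      · rw [if_pos h]; exact ih _ _ _
      · rw [if_neg h]; exact ih _ _ _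

theorem pv_splitgo_cons (sep : List Char) (fuel : Nat) (l cur : List Char) :
    ∃ x xs, PySem.Chars.splitOn.go sep fuel l cur [] = x :: xs := by
  rcases hgo : PySem.Chars.splitOn.go sep fuel l cur [] with _ | ⟨x, xs⟩
  · exact absurd hgo (pv_splitgo_ne sep fuel _ _ _)
  · exact ⟨x, xs, rfl⟩

-- splitOn.go: the current (reversed) piece prefixes the head of the result
theorem pv_splitgo_cur (sep : List Char) (fuel : Nat) : ∀ (l cur : List Char),
    PySem.Chars.splitOn.go sep fuel l cur [] =
      List.modifyHead (fun p => cur.reverse ++ p) (PySem.Chars.splitOn.go sep fuel l [] []) := by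
  induction fuel with
  | zero => intro l cur; simp [PySem.Chars.splitOn.go]
  | succ fuel ih =>
    intro l cur
    cases l with
    | nil => simp [PySem.Chars.splitOn.go]
    | cons c t =>
      simp only [PySem.Chars.splitOn.go]
      by_cases h : sep.isPrefixOf (c :: t) = true
      · rw [if_pos h, if_pos h]
        rw [pv_splitgo_acc sep fuel _ [] [cur.reverse], pv_splitgo_acc sep fuel _ [] [[].reverse]]
        obtain ⟨x, xs, hx⟩ := pv_splitgo_cons sep fuel (List.drop sep.length (c :: t)) []
        simp [hx]
      · rw [if_neg h, if_neg h, ih t (c :: cur), ih t [c]]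
        obtain ⟨x, xs, hx⟩ := pv_splitgo_cons sep fuel t []
        rw [pv_splitgo_acc] at hx
        simp at hx
        simp [hx]

-- replace.go: the reversed output accumulator factors out
theorem pv_repgo_acc (old new : List Char) (fuel : Nat) : ∀ (l acc : List Char),
    PySem.Chars.replace.go old new fuel l acc = acc.reverse ++ PySem.Chars.replace.go old new fuel l [] := by
  induction fuel with
  | zero => intro l acc; simp [PySem.Chars.replace.go]
  | succ fuel ih =>
    intro l acc
    cases l with
    | nil => simp [PySem.Chars.replace.go]
    | cons c t =>
      simp only [PySem.Chars.replace.go]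
      by_cases h : old.isPrefixOf (c :: t) = true
      · rw [if_pos h, if_pos h, ih _ (new.reverse ++ acc), ih _ (new.reverse ++ [])]
        simp
      · rw [if_neg h, if_neg h, ih t (c :: acc), ih t [c]]
        simp

-- the two scanners agree at equal fuel: join new ∘ splitOn.go = replace.go
theorem pv_main_go (sep new : List Char) (fuel : Nat) : ∀ (l : List Char),
    PySem.Chars.join new (PySem.Chars.splitOn.go sep fuel l [] []) =
      PySem.Chars.replace.go sep new fuel l [] := by
  induction fuel with
  | zero =>
    intro l
    simp only [PySem.Chars.splitOn.go, PySem.Chars.replace.go]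
    simp [PySem.Chars.join_singleton]
  | succ fuel ih =>
    intro l
    cases l with
    | nil =>
      simp only [PySem.Chars.splitOn.go, PySem.Chars.replace.go]
      simp [PySem.Chars.join_singleton]
    | cons c t =>
      simp only [PySem.Chars.splitOn.go, PySem.Chars.replace.go]
      by_cases h : sep.isPrefixOf (c :: t) = true
      · rw [if_pos h, if_pos h]
        rw [pv_splitgo_acc sep fuel _ [] [[].reverse], pv_repgo_acc sep new fuel _ (new.reverse ++ [])]
        obtain ⟨x, xs, hx⟩ := pv_splitgo_cons sep fuel (List.drop sep.length (c :: t)) []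
        rw [hx]
        simp only [List.reverse_nil, List.append_nil, List.reverse_singleton, List.singleton_append,
          List.reverse_reverse]
        rw [PySem.Chars.join_cons_cons, ← hx, ih]
        simp
      · rw [if_neg h, if_neg h]
        rw [pv_splitgo_cur sep fuel t [c], pv_repgo_acc sep new fuel t [c]]
        obtain ⟨x, xs, hx⟩ := pv_splitgo_cons sep fuel t []
        rw [hx, ← ih t, hx]
        simp only [List.modifyHead_cons, List.reverse_singleton, List.singleton_append]
        cases xs with
        | nil => simp [PySem.Chars.join_singleton]
        | cons y ys => rw [PySem.Chars.join_cons_cons, PySem.Chars.join_cons_cons]; simp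

-- splitOn.go is fuel-stable once fuel covers the remaining input (nonempty separator)
theorem pv_splitgo_fuel (sep : List Char) (hsep : sep ≠ []) (fuel : Nat) :
    ∀ (l cur : List Char) (acc : List (List Char)), l.length ≤ fuel →
    PySem.Chars.splitOn.go sep (fuel + 1) l cur acc = PySem.Chars.splitOn.go sep fuel l cur acc := by
  induction fuel with
  | zero =>
    intro l cur acc hl
    have : l = [] := List.eq_nil_of_length_eq_zero (Nat.le_zero.mp hl)
    subst this
    simp [PySem.Chars.splitOn.go]
  | succ fuel ih =>
    intro l cur acc hl
    cases l with
    | nil => simp [PySem.Chars.splitOn.go]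
    | cons c t =>
      conv_lhs => rw [show fuel + 1 + 1 = (fuel + 1) + 1 from rfl]
      simp only [PySem.Chars.splitOn.go]
      have hs : 1 ≤ sep.length := by
        cases sep with
        | nil => exact absurd rfl hsep
        | cons _ _ => simp
      simp only [List.length_cons] at hl
      by_cases h : sep.isPrefixOf (c :: t) = true
      · rw [if_pos h, if_pos h]
        apply ih
        simp only [List.length_drop, List.length_cons]
        omega
      · rw [if_neg h, if_neg h]
        apply ih
        omega

theorem pv_splitgo_fuel_ge (sep : List Char) (hsep : sep ≠ []) :
    ∀ (fuel : Nat) (l cur : List Char) (acc : List (List Char)), l.length ≤ fuel →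
    PySem.Chars.splitOn.go sep fuel l cur acc = PySem.Chars.splitOn.go sep l.length l cur acc := by
  intro fuel
  induction fuel with
  | zero =>
    intro l cur acc hl
    have : l = [] := List.eq_nil_of_length_eq_zero (Nat.le_zero.mp hl)
    subst this; rfl
  | succ fuel ih =>
    intro l cur acc hl
    rcases Nat.lt_or_ge l.length (fuel + 1) with h1 | h2
    · rw [pv_splitgo_fuel sep hsep fuel l cur acc (by omega), ih l cur acc (by omega)]
    · have : l.length = fuel + 1 := by omega
      rw [this]

theorem pv_splitOn_as_go (l sep : List Char) (hsep : sep ≠ []) :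
    PySem.Chars.splitOn l sep = PySem.Chars.splitOn.go sep l.length l [] [] := by
  rw [PySem.Chars.splitOn, pv_splitgo_fuel sep hsep l.length l [] [] (le_refl _)]

-- replace = "join new over splitOn" for a nonempty pattern
theorem pv_replace_eq_join_splitOn (s old new : List Char) (h : old ≠ []) :
    PySem.Chars.replace s old new = PySem.Chars.join new (PySem.Chars.splitOn s old) := by
  rw [pv_splitOn_as_go s old h]
  rw [PySem.Chars.replace]
  simp [List.isEmpty_iff, h, pv_main_go]

-- a separator that does not occur splits into a single piece
theorem pv_splitOn_of_not_infix (sep l : List Char) (h : ¬ sep <:+: l) :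
    PySem.Chars.splitOn l sep = [l] := by
  suffices H : ∀ (fuel : Nat) (l : List Char) (cur : List Char) (acc : List (List Char)), ¬ sep <:+: l →
      PySem.Chars.splitOn.go sep fuel l cur acc = ((cur.reverse ++ l) :: acc).reverse by
    rw [PySem.Chars.splitOn, H _ l [] [] h]; simp
  intro fuel
  induction fuel with
  | zero => intro l cur acc _; simp [PySem.Chars.splitOn.go]
  | succ fuel ih =>
    intro l cur acc hinf
    cases l with
    | nil => simp [PySem.Chars.splitOn.go]
    | cons c t =>
      simp only [PySem.Chars.splitOn.go]
      have hpre : ¬ sep.isPrefixOf (c :: t) = true := by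
        intro hc
        exact hinf (List.IsPrefix.isInfix (List.isPrefixOf_iff_prefix.mp hc))
      rw [if_neg hpre]
      rw [ih t (c :: cur) acc (fun hi => hinf (hi.trans ((List.suffix_cons c t).isInfix)))]
      simp

theorem pv_splitOn_ne (l sep : List Char) :
    PySem.Chars.splitOn l sep ≠ [] := by
  rw [PySem.Chars.splitOn]; exact pv_splitgo_ne _ _ _ _ _

-- replace of an absent pattern is the identity
theorem pv_replace_id (l old new : List Char) (hold : old ≠ []) (h : ¬ old <:+: l) :
    PySem.Chars.replace l old new = l := by
  rw [pv_replace_eq_join_splitOn l old new hold, pv_splitOn_of_not_infix old l h,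
    PySem.Chars.join_singleton]

-- splitOn of (a ++ w ++ b) at a leftmost match: first piece a, rest splitOn b
theorem pv_go_decomp (w b : List Char) (hw : w ≠ []) :
    ∀ (a : List Char) (f : Nat) (cur : List Char) (acc : List (List Char)),
      (∀ p < a.length, ¬ w <+: List.drop p (a ++ w ++ b)) →
      a.length + w.length + b.length ≤ f →
      PySem.Chars.splitOn.go w f (a ++ w ++ b) cur acc
        = acc.reverse ++ (cur.reverse ++ a) :: PySem.Chars.splitOn b w := by
  intro a
  induction a with
  | nil =>
    intro f cur acc _ hf
    have hwl : 1 ≤ w.length := List.length_pos_of_ne_nil hw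
    obtain ⟨f', rfl⟩ : ∃ f', f = f' + 1 := ⟨f - 1, by omega⟩
    obtain ⟨wc, wt, rfl⟩ : ∃ wc wt, w = wc :: wt := by
      cases w with
      | nil => exact absurd rfl hw
      | cons wc wt => exact ⟨wc, wt, rfl⟩
    simp only [List.nil_append, List.cons_append]
    simp only [PySem.Chars.splitOn.go]
    have hpre : (wc :: wt).isPrefixOf (wc :: (wt ++ b)) = true := by
      rw [List.isPrefixOf_iff_prefix, ← List.cons_append]
      exact List.prefix_append _ _
    rw [if_pos hpre]
    have hdrop : List.drop (wc :: wt).length (wc :: (wt ++ b)) = b := by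
      rw [← List.cons_append]
      exact List.drop_left
    rw [hdrop]
    rw [pv_splitgo_acc]
    rw [pv_splitgo_fuel_ge (wc :: wt) hw f' b [] [] (by simp at hf ⊢; omega)]
    rw [← pv_splitOn_as_go b (wc :: wt) hw]
    simp
  | cons c a' ih =>
    intro f cur acc hmin hf
    obtain ⟨f', rfl⟩ : ∃ f', f = f' + 1 := ⟨f - 1, by simp at hf; omega⟩
    simp only [List.cons_append]
    simp only [PySem.Chars.splitOn.go]
    have hnp : ¬ w.isPrefixOf (c :: (a' ++ w ++ b)) = true := by
      intro hcontra
      exact hmin 0 (by simp) (by simpa using List.isPrefixOf_iff_prefix.mp hcontra)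
    rw [if_neg hnp]
    rw [ih f' (c :: cur) acc
      (fun p hp => by
        have := hmin (p + 1) (by simpa using Nat.succ_lt_succ hp)
        simpa using this)
      (by simp at hf ⊢; omega)]
    simp

theorem pv_splitOn_decomp (w a b : List Char) (hw : w ≠ [])
    (hmin : ∀ p < a.length, ¬ w <+: List.drop p (a ++ w ++ b)) :
    PySem.Chars.splitOn (a ++ w ++ b) w = a :: PySem.Chars.splitOn b w := by
  rw [PySem.Chars.splitOn]
  rw [pv_go_decomp w b hw a ((a ++ w ++ b).length + 1) [] [] hmin (by simp; omega)]
  simp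

-- every piece of splitOn is an infix of the original list
theorem pv_first_match (w : List Char) (hw : w ≠ []) :
    ∀ l : List Char, (¬ w <:+: l) ∨
      ∃ a b, l = a ++ w ++ b ∧ ∀ p < a.length, ¬ w <+: List.drop p l := by
  intro l
  induction l with
  | nil =>
    left
    intro h
    exact hw (by simpa using h)
  | cons c t ih =>
    by_cases hp : w <+: (c :: t)
    · right
      obtain ⟨b, hb⟩ := hp
      exact ⟨[], b, by simp [← hb], fun p hp' => absurd hp' (by simp)⟩
    · cases ih with
      | inl h =>
        left
        intro hcontra
        rcases List.infix_cons_iff.mp hcontra with h1 | h2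
        · exact hp h1
        · exact h h2
      | inr h =>
        obtain ⟨a, b, heq, hmin⟩ := h
        right
        refine ⟨c :: a, b, by simp [heq], ?_⟩
        intro p hp'
        cases p with
        | zero => simpa using hp
        | succ p =>
          have hlt : p < a.length := by simpa using Nat.lt_of_succ_lt_succ hp'
          have := hmin p hlt
          simpa using this

theorem pv_split_infix (w : List Char) (hw : w ≠ []) :
    ∀ (n : Nat) (l : List Char), l.length = n →
      ∀ p ∈ PySem.Chars.splitOn l w, p <:+: l := by
  intro n
  induction n using Nat.strong_induction_on with
  | _ n ih =>
    intro l hl p hp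
    rcases pv_first_match w hw l with hno | ⟨a, b, rfl, hmin⟩
    · rw [pv_splitOn_of_not_infix w l hno] at hp
      simp only [List.mem_singleton] at hp
      subst hp
      exact List.infix_refl _
    · rw [pv_splitOn_decomp w a b hw hmin] at hp
      rcases List.mem_cons.mp hp with rfl | hp
      · rw [List.append_assoc]
        exact (List.prefix_append p (w ++ b)).isInfix
      · have hblen : b.length < n := by
          subst hl
          have := List.length_pos_of_ne_nil hw
          simp
          omega
        have := ih b.length hblen b rfl p hp
        exact this.trans ((List.suffix_append (a ++ w) b).isInfix)

-- ---------- replace across a '*' boundary ----------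

theorem pv_repgo_zero (old new : List Char) (l acc : List Char) :
    PySem.Chars.replace.go old new 0 l acc = acc.reverse ++ l := by
  simp [PySem.Chars.replace.go]

theorem pv_repgo_fuel (old new : List Char) (hold : old ≠ []) (fuel : Nat) :
    ∀ (l acc : List Char), l.length ≤ fuel →
    PySem.Chars.replace.go old new (fuel + 1) l acc = PySem.Chars.replace.go old new fuel l acc := by
  induction fuel with
  | zero =>
    intro l acc hl
    have : l = [] := List.eq_nil_of_length_eq_zero (Nat.le_zero.mp hl)
    subst this
    simp [PySem.Chars.replace.go]
  | succ fuel ih =>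
    intro l acc hl
    cases l with
    | nil => simp [PySem.Chars.replace.go]
    | cons c t =>
      conv_lhs => rw [show fuel + 1 + 1 = (fuel + 1) + 1 from rfl]
      simp only [PySem.Chars.replace.go]
      have hs : 1 ≤ old.length := List.length_pos_of_ne_nil hold
      simp only [List.length_cons] at hl
      by_cases h : old.isPrefixOf (c :: t) = true
      · rw [if_pos h, if_pos h]
        apply ih
        simp only [List.length_drop, List.length_cons]
        omega
      · rw [if_neg h, if_neg h]
        apply ih
        omega

theorem pv_repgo_fuel_ge (old new : List Char) (hold : old ≠ []) :
    ∀ (fuel : Nat) (l acc : List Char), l.length ≤ fuel →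
    PySem.Chars.replace.go old new fuel l acc = PySem.Chars.replace.go old new l.length l acc := by
  intro fuel
  induction fuel with
  | zero =>
    intro l acc hl
    have : l = [] := List.eq_nil_of_length_eq_zero (Nat.le_zero.mp hl)
    subst this; rfl
  | succ fuel ih =>
    intro l acc hl
    rcases Nat.lt_or_ge l.length (fuel + 1) with h1 | h2
    · rw [pv_repgo_fuel old new hold fuel l acc (by omega), ih l acc (by omega)]
    · have : l.length = fuel + 1 := by omega
      rw [this]

theorem pv_repgo_star (old new y : List Char) (hold : old ≠ []) (hstar : '*' ∉ old) :
    ∀ (n : Nat) (x : List Char), x.length = n → ∀ (f : Nat) (acc : List Char),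
      x.length + 1 + y.length ≤ f →
      PySem.Chars.replace.go old new f (x ++ '*' :: y) acc
        = acc.reverse ++ PySem.Chars.replace.go old new x.length x []
            ++ '*' :: PySem.Chars.replace.go old new y.length y [] := by
  intro n
  induction n using Nat.strong_induction_on with
  | _ n ih =>
    intro x hx f acc hf
    obtain ⟨f', rfl⟩ : ∃ f', f = f' + 1 := ⟨f - 1, by omega⟩
    cases x with
    | nil =>
      obtain ⟨oc, ot, rfl⟩ : ∃ oc ot, old = oc :: ot := by
        cases old with
        | nil => exact absurd rfl hold
        | cons oc ot => exact ⟨oc, ot, rfl⟩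
      simp only [List.nil_append]
      simp only [PySem.Chars.replace.go]
      have hnp : ¬ (oc :: ot).isPrefixOf ('*' :: y) = true := by
        intro hcontra
        obtain ⟨r, hr⟩ := List.isPrefixOf_iff_prefix.mp hcontra
        have : oc = '*' := by
          have := congrArg (fun l => l.head?) hr
          simpa using this
        exact hstar (by simp [this])
      rw [if_neg hnp]
      rw [pv_repgo_acc]
      rw [pv_repgo_fuel_ge (oc :: ot) new hold f' y ([]) (by simp at hf; omega)]
      simp [pv_repgo_zero]
    | cons c x' =>
      by_cases hm : old.isPrefixOf (c :: x' ++ '*' :: y) = true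
      · have hpre : old <+: (c :: x') ++ '*' :: y := List.isPrefixOf_iff_prefix.mp (by simpa using hm)
        have hlen : old.length ≤ (c :: x').length := by
          by_contra hcon
          push_neg at hcon
          have hget : old[(c :: x').length]'(by omega) = '*' := by
            rw [hpre.getElem]
            rw [List.getElem_append_right (by omega)]
            simp
          exact hstar (hget ▸ List.getElem_mem _)
        have hpx : old <+: (c :: x') := by
          rcases List.prefix_or_prefix_of_prefix hpre (List.prefix_append (c :: x') ('*' :: y)) with h1 | h1
          · exact h1
          · rw [List.IsPrefix.eq_of_length_le h1 hlen]
        have hsm : old.isPrefixOf (c :: x') = true := List.isPrefixOf_iff_prefix.mpr hpx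
        have hold1 : 1 ≤ old.length := List.length_pos_of_ne_nil hold
        simp only [List.cons_append, PySem.Chars.replace.go]
        rw [if_pos (by simpa using hm)]
        have hdx : List.drop old.length (c :: (x' ++ '*' :: y))
            = List.drop old.length (c :: x') ++ '*' :: y := by
          rw [show (c :: (x' ++ '*' :: y)) = (c :: x') ++ '*' :: y from by simp]
          exact List.drop_append_of_le_length hlen
        rw [hdx]
        have hdxlen : (List.drop old.length (c :: x')).length = (c :: x').length - old.length := by
          simp
        rw [ih ((c :: x').length - old.length) (by omega) _ hdxlen f' (new.reverse ++ acc)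
          (by simp only [List.length_drop, List.length_cons] at hf ⊢; omega)]
        have hsmall : PySem.Chars.replace.go old new (c :: x').length (c :: x') []
            = new ++ PySem.Chars.replace.go old new ((c :: x').length - old.length)
                (List.drop old.length (c :: x')) [] := by
          simp only [List.length_cons, PySem.Chars.replace.go]
          rw [if_pos hsm]
          rw [pv_repgo_acc]
          rw [pv_repgo_fuel_ge old new hold x'.length (List.drop old.length (c :: x')) []
            (by simp; omega)]
          rw [show (List.drop old.length (c :: x')).length = (c :: x').length - old.length from by simp]
          simp
        rw [hsmall]
        simp
      · have hsm : ¬ old.isPrefixOf (c :: x') = true := by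
          intro hcon
          exact hm (List.isPrefixOf_iff_prefix.mpr
            ((List.isPrefixOf_iff_prefix.mp hcon).trans (List.prefix_append (c :: x') ('*' :: y))))
        simp only [List.cons_append, PySem.Chars.replace.go]
        rw [if_neg (by simpa using hm)]
        rw [ih x'.length (by simp only [List.length_cons] at hx; omega) x' rfl f' (c :: acc)
          (by simp only [List.length_cons] at hf ⊢; omega)]
        have hsmall : PySem.Chars.replace.go old new (c :: x').length (c :: x') []
            = c :: PySem.Chars.replace.go old new x'.length x' [] := by
          simp only [List.length_cons, PySem.Chars.replace.go]
          rw [if_neg hsm]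
          rw [pv_repgo_acc]
          simp
        rw [hsmall]
        simp

theorem pv_replace_star (old new x y : List Char) (hold : old ≠ []) (hstar : '*' ∉ old) :
    PySem.Chars.replace (x ++ '*' :: y) old new
      = PySem.Chars.replace x old new ++ '*' :: PySem.Chars.replace y old new := by
  rw [PySem.Chars.replace, PySem.Chars.replace, PySem.Chars.replace]
  simp only [List.isEmpty_iff, hold, ite_false]
  rw [pv_repgo_star old new y hold hstar x.length x rfl (x ++ '*' :: y).length []
    (by simp only [List.length_append, List.length_cons]; omega)]
  simp

-- ---------- chain lemmas ----------

theorem pv_chain_nil (ws : List (List Char)) (hws : ∀ w ∈ ws, w ≠ []) :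
    pvChain ws [] = [] := by
  induction ws with
  | nil => rfl
  | cons w t ih =>
    have hw : w ≠ [] := hws w (by simp)
    show pvChain t (PySem.Chars.replace [] w pvMask) = []
    rw [pv_replace_id [] w pvMask hw (by simp [hw])]
    exact ih (fun x hx => hws x (by simp [hx]))

theorem pv_chain_star (ws : List (List Char)) (hws : ∀ w ∈ ws, w ≠ [] ∧ '*' ∉ w) :
    ∀ x y, pvChain ws (x ++ '*' :: y) = pvChain ws x ++ '*' :: pvChain ws y := by
  induction ws with
  | nil => intro x y; rfl
  | cons w t ih =>
    intro x y
    obtain ⟨hw, hstar⟩ := hws w (by simp)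
    show pvChain t (PySem.Chars.replace (x ++ '*' :: y) w pvMask) = _
    rw [pv_replace_star w pvMask x y hw hstar]
    exact ih (fun u hu => hws u (by simp [hu])) _ _

theorem pv_chain_join (ws : List (List Char)) (hws : ∀ w ∈ ws, w ≠ [] ∧ '*' ∉ w) :
    ∀ parts : List (List Char),
      pvChain ws (PySem.Chars.join pvMask parts) = PySem.Chars.join pvMask (parts.map (pvChain ws)) := by
  intro parts
  induction parts with
  | nil =>
    simp [PySem.Chars.join]
    exact pv_chain_nil ws (fun w hw => (hws w hw).1)
  | cons p rest ih =>
    cases rest with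
    | nil => simp [PySem.Chars.join_singleton]
    | cons q qs =>
      rw [show pvMask = ['*', '*', '*'] from rfl] at *
      rw [PySem.Chars.join_cons_cons]
      have h1 : p ++ ['*', '*', '*'] ++ PySem.Chars.join ['*', '*', '*'] (q :: qs)
          = p ++ '*' :: ('*' :: ('*' :: PySem.Chars.join ['*', '*', '*'] (q :: qs))) := by simp
      rw [h1]
      rw [pv_chain_star ws hws]
      rw [show ('*' :: ('*' :: PySem.Chars.join ['*', '*', '*'] (q :: qs)))
        = [] ++ '*' :: ('*' :: PySem.Chars.join ['*', '*', '*'] (q :: qs)) from rfl]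
      rw [pv_chain_star ws hws]
      rw [show ('*' :: PySem.Chars.join ['*', '*', '*'] (q :: qs))
        = [] ++ '*' :: PySem.Chars.join ['*', '*', '*'] (q :: qs) from rfl]
      rw [pv_chain_star ws hws]
      rw [pv_chain_nil ws (fun w hw => (hws w hw).1), ih]
      simp only [List.map_cons]
      rw [PySem.Chars.join_cons_cons]
      simp

-- ---------- scanner lemmas ----------

theorem pv_scan_fuel (ws : List (List Char)) (hws : ∀ w ∈ ws, w ≠ []) :
    ∀ (fuel : Nat) (l : List Char), l.length ≤ fuel →
      pvScanGo ws (fuel + 1) l = pvScanGo ws fuel l := by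
  intro fuel
  induction fuel with
  | zero =>
    intro l hl
    have : l = [] := List.eq_nil_of_length_eq_zero (Nat.le_zero.mp hl)
    subst this; rfl
  | succ fuel ih =>
    intro l hl
    cases l with
    | nil => rfl
    | cons c t =>
      simp only [pvScanGo]
      cases hfind : List.find? (fun w => w.isPrefixOf (c :: t)) ws with
      | some w =>
        have hmem : w ∈ ws := List.mem_of_find?_eq_some hfind
        have hw : 1 ≤ w.length := List.length_pos_of_ne_nil (hws w hmem)
        dsimp only
        rw [ih _ (by simp only [List.length_drop, List.length_cons] at hl ⊢; omega)]
      | none =>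
        dsimp only
        rw [ih t (by simp only [List.length_cons] at hl; omega)]

theorem pv_scan_fuel_ge (ws : List (List Char)) (hws : ∀ w ∈ ws, w ≠ []) :
    ∀ (fuel : Nat) (l : List Char), l.length ≤ fuel →
      pvScanGo ws fuel l = pvScanGo ws l.length l := by
  intro fuel
  induction fuel with
  | zero =>
    intro l hl
    have : l = [] := List.eq_nil_of_length_eq_zero (Nat.le_zero.mp hl)
    subst this; rfl
  | succ fuel ih =>
    intro l hl
    rcases Nat.lt_or_ge l.length (fuel + 1) with h1 | h2
    · rw [pv_scan_fuel ws hws fuel l (by omega), ih l (by omega)]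
    · have : l.length = fuel + 1 := by omega
      rw [this]

theorem pv_scan_ws_nil : ∀ (fuel : Nat) (l : List Char), l.length ≤ fuel → pvScanGo [] fuel l = l := by
  intro fuel
  induction fuel with
  | zero =>
    intro l hl
    have : l = [] := List.eq_nil_of_length_eq_zero (Nat.le_zero.mp hl)
    subst this; rfl
  | succ fuel ih =>
    intro l hl
    cases l with
    | nil => rfl
    | cons c t =>
      simp only [pvScanGo, List.find?_nil]
      rw [ih t (by simp only [List.length_cons] at hl; omega)]

-- if w never occurs, the scanner ignores it
theorem pv_scan_nomatch (w : List Char) (ws : List (List Char)) :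
    ∀ (fuel : Nat) (l : List Char), ¬ w <:+: l → pvScanGo (w :: ws) fuel l = pvScanGo ws fuel l := by
  intro fuel
  induction fuel with
  | zero => intro l _; cases l <;> rfl
  | succ fuel ih =>
    intro l hno
    cases l with
    | nil => rfl
    | cons c t =>
      have hw : ¬ w.isPrefixOf (c :: t) = true := by
        intro hcontra
        exact hno (List.isPrefixOf_iff_prefix.mp hcontra).isInfix
      simp only [pvScanGo]
      have hstep : List.find? (fun v => v.isPrefixOf (c :: t)) (w :: ws)
          = List.find? (fun v => v.isPrefixOf (c :: t)) ws := List.find?_cons_of_neg hw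
      rw [hstep]
      cases hfind : List.find? (fun v => v.isPrefixOf (c :: t)) ws with
      | some v =>
        dsimp only
        rw [ih _ (fun hcontra => hno (hcontra.trans ((List.drop_suffix _ _).isInfix)))]
      | none =>
        dsimp only
        rw [ih t (fun hcontra => hno (hcontra.trans ((List.suffix_cons c t).isInfix)))]

-- pvOK is inherited by infixes
theorem pv_ok_infix {l u : List Char} (hOK : pvOK l) (h : u <:+: l) : pvOK u := by
  intro c hc hcontra
  exact hOK c hc (hcontra.trans h)

-- a lower-priority word cannot cross into a w occurrence: its match stays inside a
theorem pv_no_cross (w wk a b : List Char) (hcross : pvCross w wk)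
    (hOK : pvOK (a ++ w ++ b)) (p : Nat) (hp : p < a.length)
    (hpre : wk <+: List.drop p (a ++ w ++ b)) : wk <+: List.drop p a := by
  by_cases hin : p + wk.length ≤ a.length
  · have hd : List.drop p (a ++ w ++ b) = List.drop p a ++ (w ++ b) := by
      rw [List.append_assoc]
      exact List.drop_append_of_le_length (by omega)
    rw [hd] at hpre
    rcases List.prefix_or_prefix_of_prefix hpre (List.prefix_append (List.drop p a) (w ++ b)) with h1 | h1
    · exact h1
    · have heq : List.drop p a = wk :=
        List.IsPrefix.eq_of_length_le h1 (by simp only [List.length_drop]; omega)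
      rw [heq]
  · exfalso
    push_neg at hin
    set k := p + wk.length - a.length with hk
    have hk1 : 1 ≤ k := by omega
    have hklt : k < wk.length := by omega
    have hd : List.drop p (a ++ w ++ b) = List.drop p a ++ (w ++ b) := by
      rw [List.append_assoc]
      exact List.drop_append_of_le_length (by omega)
    rw [hd] at hpre
    obtain ⟨r, hr⟩ := hpre
    have hlen_dpa : (List.drop p a).length = wk.length - k := by
      simp only [List.length_drop]
      omega
    have htail : wk.drop (wk.length - k) ++ r = w ++ b := by
      have h := congrArg (List.drop (wk.length - k)) hr
      rw [List.drop_append_of_le_length (by omega)] at h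
      rw [List.drop_append_of_le_length (le_of_eq hlen_dpa.symm)] at h
      rw [List.drop_eq_nil_of_le (le_of_eq hlen_dpa)] at h
      simpa using h
    have hdis : wk.drop (wk.length - k) <+: w ∨ w <+: wk.drop (wk.length - k) :=
      List.prefix_or_prefix_of_prefix ⟨r, htail⟩ (List.prefix_append w b)
    obtain ⟨c, hcmem, hceq⟩ := hcross k (by simpa using hklt) hk1 hdis
    apply hOK c hcmem
    rw [hceq]
    have hpl : wk ++ r = List.drop p (a ++ w ++ b) := by rw [hd]; exact hr
    by_cases hkw : k ≤ w.length
    · have hjk : (wk.drop (wk.length - k)).length = k := by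
        simp only [List.length_drop]; omega
      have hrval : r = w.drop k ++ b := by
        have h2 := congrArg (List.drop k) htail
        rw [List.drop_append_of_le_length (le_of_eq hjk.symm)] at h2
        rw [List.drop_eq_nil_of_le (le_of_eq hjk)] at h2
        rw [List.drop_append_of_le_length hkw] at h2
        simpa using h2
      have hup : wk ++ w.drop (min k w.length) <+: List.drop p (a ++ w ++ b) := by
        rw [Nat.min_eq_left hkw, ← hpl, hrval]
        exact ⟨b, by simp⟩
      exact hup.isInfix.trans (List.drop_suffix _ _).isInfix
    · have hup : wk ++ w.drop (min k w.length) <+: List.drop p (a ++ w ++ b) := by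
        rw [Nat.min_eq_right (by omega), List.drop_length, List.append_nil, ← hpl]
        exact List.prefix_append wk r
      exact hup.isInfix.trans (List.drop_suffix _ _).isInfix

-- inside a, the combined prefix tests coincide with the tests against a alone
theorem pv_inside (w wk a b : List Char) (hcross : pvCross w wk)
    (hOK : pvOK (a ++ w ++ b)) (p : Nat) (hp : p < a.length) :
    wk.isPrefixOf (List.drop p (a ++ w ++ b)) = wk.isPrefixOf (List.drop p a) := by
  cases hbig : wk.isPrefixOf (List.drop p (a ++ w ++ b)) with
  | true =>
    have := pv_no_cross w wk a b hcross hOK p hp (List.isPrefixOf_iff_prefix.mp hbig)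
    exact (List.isPrefixOf_iff_prefix.mpr this).symm
  | false =>
    cases hsm : wk.isPrefixOf (List.drop p a) with
    | true =>
      exfalso
      have h1 : wk <+: List.drop p a := List.isPrefixOf_iff_prefix.mp hsm
      have h2 : wk <+: List.drop p (a ++ w ++ b) := by
        rw [List.append_assoc, List.drop_append_of_le_length (by omega)]
        exact h1.trans (List.prefix_append _ _)
      rw [List.isPrefixOf_iff_prefix.mpr h2] at hbig
      exact Bool.noConfusion hbig
    | false => rfl

theorem pv_find_congr {α : Type} (f g : α → Bool) :
    ∀ ws : List α, (∀ x ∈ ws, f x = g x) → List.find? f ws = List.find? g ws := by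
  intro ws
  induction ws with
  | nil => intro _; rfl
  | cons a t ih =>
    intro h
    by_cases hf : f a = true
    · rw [List.find?_cons_of_pos hf, List.find?_cons_of_pos (by rw [← h a (by simp)]; exact hf)]
    · rw [List.find?_cons_of_neg hf, List.find?_cons_of_neg (by rw [← h a (by simp)]; exact hf)]
      exact ih (fun x hx => h x (by simp [hx]))

-- the scanner on a ++ w ++ b (leftmost w at |a|): scans a with the remaining words,
-- masks w, and continues on b
theorem pv_scan_decomp (w : List Char) (ws : List (List Char)) (b : List Char)
    (hw : w ≠ []) (hws : ∀ wk ∈ ws, wk ≠ []) (hcross : ∀ wk ∈ ws, pvCross w wk) :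
    ∀ (n : Nat) (a : List Char), a.length = n → pvOK (a ++ w ++ b) →
      (∀ p < a.length, ¬ w <+: List.drop p (a ++ w ++ b)) →
      ∀ f, (a ++ w ++ b).length ≤ f →
      pvScanGo (w :: ws) f (a ++ w ++ b)
        = pvScanGo ws a.length a ++ '*' :: '*' :: '*' :: pvScanGo (w :: ws) b.length b := by
  have hwsne : ∀ wk ∈ w :: ws, wk ≠ [] := by
    intro wk hwk
    rcases List.mem_cons.mp hwk with rfl | h
    · exact hw
    · exact hws wk h
  intro n
  induction n using Nat.strong_induction_on with
  | _ n ih =>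
    intro a ha hOK hmin f hf
    cases a with
    | nil =>
      obtain ⟨wc, wt, rfl⟩ : ∃ wc wt, w = wc :: wt := by
        cases w with
        | nil => exact absurd rfl hw
        | cons wc wt => exact ⟨wc, wt, rfl⟩
      obtain ⟨f', rfl⟩ : ∃ f', f = f' + 1 := ⟨f - 1, by simp at hf; omega⟩
      dsimp only [List.nil_append, List.cons_append] at hf ⊢
      simp only [pvScanGo]
      have hfw : List.find? (fun v => v.isPrefixOf (wc :: (wt ++ b))) ((wc :: wt) :: ws)
          = some (wc :: wt) := by
        apply List.find?_cons_of_pos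
        rw [List.isPrefixOf_iff_prefix, ← List.cons_append]
        exact List.prefix_append _ _
      rw [hfw]
      dsimp only
      have hdrop : List.drop (wc :: wt).length (wc :: (wt ++ b)) = b := by
        rw [← List.cons_append]
        exact List.drop_left
      rw [hdrop]
      rw [pv_scan_fuel_ge ((wc :: wt) :: ws) hwsne f' b (by simp at hf ⊢; omega)]
      simp
    | cons c a' =>
      obtain ⟨f', rfl⟩ : ∃ f', f = f' + 1 := ⟨f - 1, by simp at hf; omega⟩
      dsimp only [List.cons_append] at hmin hOK hf ⊢
      simp only [pvScanGo]
      have hwp : ¬ w.isPrefixOf (c :: (a' ++ w ++ b)) = true := by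
        intro hcontra
        refine hmin 0 (by simp) ?_
        simpa using (List.isPrefixOf_iff_prefix.mp hcontra)
      have hstep : List.find? (fun v => v.isPrefixOf (c :: (a' ++ w ++ b))) (w :: ws)
          = List.find? (fun v => v.isPrefixOf (c :: (a' ++ w ++ b))) ws :=
        List.find?_cons_of_neg hwp
      rw [hstep]
      have hcongr : List.find? (fun v => v.isPrefixOf (c :: (a' ++ w ++ b))) ws
          = List.find? (fun v => v.isPrefixOf (c :: a')) ws := by
        apply pv_find_congr
        intro wk hwk
        have := pv_inside w wk (c :: a') b (hcross wk hwk) hOK 0 (by simp)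
        simpa using this
      rw [hcongr]
      have hsmall : pvScanGo ws (c :: a').length (c :: a')
          = (match List.find? (fun v => v.isPrefixOf (c :: a')) ws with
            | some wk => '*' :: '*' :: '*' :: pvScanGo ws a'.length (List.drop wk.length (c :: a'))
            | none => c :: pvScanGo ws a'.length a') := by
        simp only [List.length_cons, pvScanGo]
      rw [hsmall]
      cases hfind : List.find? (fun v => v.isPrefixOf (c :: a')) ws with
      | some wk =>
        dsimp only
        have hmem := List.mem_of_find?_eq_some hfind
        have hps := List.find?_some hfind
        have hwkpre : wk <+: (c :: a') := List.isPrefixOf_iff_prefix.mp hps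
        have hwk1 : 1 ≤ wk.length := List.length_pos_of_ne_nil (hws wk hmem)
        have hwklen : wk.length ≤ (c :: a').length := hwkpre.length_le
        have hdropl : List.drop wk.length (c :: (a' ++ w ++ b))
            = List.drop wk.length (c :: a') ++ w ++ b := by
          rw [show (c :: (a' ++ w ++ b)) = (c :: a') ++ (w ++ b) from by simp]
          rw [List.drop_append_of_le_length hwklen, ← List.append_assoc]
        rw [hdropl]
        have hlen' : (List.drop wk.length (c :: a')).length < n := by
          simp only [List.length_drop, List.length_cons] at *
          omega
        rw [ih _ hlen' _ rfl
          (by rw [← hdropl]; exact pv_ok_infix hOK ((List.drop_suffix _ _).isInfix))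
          (by
            intro p hp
            rw [← hdropl, List.drop_drop]
            apply hmin
            simp only [List.length_drop, List.length_cons] at hp ⊢
            omega)
          f'
          (by
            rw [← hdropl]
            simp only [List.length_drop, List.length_cons] at hf ⊢
            omega)]
        rw [pv_scan_fuel_ge ws hws a'.length (List.drop wk.length (c :: a'))
          (by simp only [List.length_drop, List.length_cons]; omega)]
        simp
      | none =>
        dsimp only
        have hlen' : a'.length < n := by
          simp only [List.length_cons] at ha
          omega
        rw [ih a'.length hlen' a' rfl
          (pv_ok_infix hOK ((List.suffix_cons c _).isInfix))
          (by
            intro p hp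
            have := hmin (p + 1) (by simp only [List.length_cons]; omega)
            simpa using this)
          f'
          (by simp only [List.length_append, List.length_cons] at hf ⊢; omega)]
        simp

-- the scanner factors through splitOn on the highest-priority word
theorem pv_scanB (w : List Char) (ws : List (List Char))
    (hw : w ≠ []) (hws : ∀ wk ∈ ws, wk ≠ []) (hcross : ∀ wk ∈ ws, pvCross w wk) :
    ∀ (n : Nat) (l : List Char), l.length = n → pvOK l →
      pvScanGo (w :: ws) l.length l
        = PySem.Chars.join pvMask
            ((PySem.Chars.splitOn l w).map (fun p => pvScanGo ws p.length p)) := by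
  intro n
  induction n using Nat.strong_induction_on with
  | _ n ih =>
    intro l hl hOK
    rcases pv_first_match w hw l with hno | ⟨a, b, rfl, hmin⟩
    · rw [pv_splitOn_of_not_infix w l hno]
      simp only [List.map_cons, List.map_nil, PySem.Chars.join_singleton]
      exact pv_scan_nomatch w ws l.length l hno
    · rw [pv_splitOn_decomp w a b hw hmin]
      obtain ⟨q, qs, hq⟩ : ∃ q qs, PySem.Chars.splitOn b w = q :: qs := by
        rcases hsp : PySem.Chars.splitOn b w with _ | ⟨q, qs⟩
        · exact absurd hsp (pv_splitOn_ne b w)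
        · exact ⟨q, qs, rfl⟩
      rw [pv_scan_decomp w ws b hw hws hcross a.length a rfl hOK hmin (a ++ w ++ b).length (le_refl _)]
      have hblen : b.length < n := by
        subst hl
        have := List.length_pos_of_ne_nil hw
        simp
        omega
      have hOKb : pvOK b := pv_ok_infix hOK ((List.suffix_append (a ++ w) b).isInfix)
      rw [ih b.length hblen b rfl hOKb]
      rw [hq]
      simp only [List.map_cons, PySem.Chars.join_cons_cons]
      rw [show pvMask = ['*', '*', '*'] from rfl]
      simp

-- ---------- fold bridge: port A as a character-level chain ----------

theorem pv_stepA (s fw : String) (h : fw.toList ≠ []) :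
    (if PySem.Str.isIn (PySem.Str.lower fw) (PySem.Str.lower s) then
        PySem.Str.replace s fw "***"
      else s)
      = String.ofList (PySem.Chars.replace s.toList fw.toList pvMask) := by
  have hmask : "***".toList = pvMask := by decide
  by_cases hin : PySem.Str.isIn (PySem.Str.lower fw) (PySem.Str.lower s) = true
  · rw [if_pos hin]
    rw [← String.ofList_toList (s := PySem.Str.replace s fw "***"), PySem.Str.toList_replace, hmask]
  · rw [if_neg hin]
    have hninf : ¬ fw.toList <:+: s.toList := by
      intro hinf
      apply hin
      rw [PySem.Str.isIn]
      have : (PySem.Str.lower fw).toList <:+: (PySem.Str.lower s).toList := by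
        simp only [PySem.Str.toList_lower, PySem.Chars.lower]
        exact List.IsInfix.map _ hinf
      exact (PySem.Chars.isIn_iff_infix _ _).mpr this
    rw [pv_replace_id s.toList fw.toList pvMask h hninf, String.ofList_toList]

theorem pv_fold_bridge :
    ∀ (ws : List String), (∀ w ∈ ws, w.toList ≠ []) → ∀ s : String,
      ws.foldl
        (fun sanitized fw =>
          if PySem.Str.isIn (PySem.Str.lower fw) (PySem.Str.lower sanitized) then
            PySem.Str.replace sanitized fw "***"
          else sanitized) s
        = String.ofList (pvChain (ws.map String.toList) s.toList) := by
  intro ws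
  induction ws with
  | nil => intro _ s; exact (String.ofList_toList).symm
  | cons w t ih =>
    intro h s
    show t.foldl _ (if _ then _ else _) = _
    rw [pv_stepA s w (h w (by simp))]
    rw [ih (fun x hx => h x (by simp [hx]))]
    show _ = String.ofList (pvChain (t.map String.toList) (PySem.Chars.replace s.toList w.toList pvMask))
    rw [String.toList_ofList]

-- ---------- main equivalence ----------

theorem pv_main : ∀ ws : List (List Char), pvGood ws → ∀ l : List Char, pvOK l →
    pvChain ws l = pvScanGo ws l.length l := by
  intro ws
  induction ws with
  | nil =>
    intro _ l _
    show l = pvScanGo [] l.length l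
    rw [pv_scan_ws_nil l.length l (le_refl _)]
  | cons w t ih =>
    intro hg l hOK
    obtain ⟨hne, hpw⟩ := hg
    obtain ⟨hw_ne, _⟩ := hne w (by simp)
    have hcross : ∀ wk ∈ t, pvCross w wk := fun wk hwk => (List.pairwise_cons.mp hpw).1 wk hwk
    have hgt : pvGood t := ⟨fun x hx => hne x (by simp [hx]), (List.pairwise_cons.mp hpw).2⟩
    have htne : ∀ wk ∈ t, wk ≠ [] := fun wk hwk => (hne wk (by simp [hwk])).1
    calc pvChain (w :: t) l
        = pvChain t (PySem.Chars.replace l w pvMask) := rfl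
      _ = pvChain t (PySem.Chars.join pvMask (PySem.Chars.splitOn l w)) := by
          rw [pv_replace_eq_join_splitOn l w pvMask hw_ne]
      _ = PySem.Chars.join pvMask ((PySem.Chars.splitOn l w).map (pvChain t)) := by
          rw [pv_chain_join t (fun x hx => hne x (by simp [hx]))]
      _ = PySem.Chars.join pvMask
            ((PySem.Chars.splitOn l w).map (fun p => pvScanGo t p.length p)) := by
          congr 1
          apply List.map_congr_left
          intro p hp
          exact ih hgt p (pv_ok_infix hOK (pv_split_infix w hw_ne l.length l rfl p hp))
      _ = pvScanGo (w :: t) l.length l := by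
          rw [pv_scanB w t hw_ne htne hcross l.length l rfl hOK]

-- ===== VERDICT (by name: the statement is the Claim_ definition above) =====
set_option maxHeartbeats 2000000 in
theorem pv_good_concrete : pvGood (pvForbiddenB.map String.toList) := by
  unfold pvGood pvCross pvForbiddenB pvCollisions
  decide

theorem pv_A_char (text : String) :
    sanitize_text_block_py text
      = String.ofList (pvChain (pvForbiddenB.map String.toList) text.toList) :=
  pv_fold_bridge pvForbiddenB (by decide) text

theorem pv_okify (text : String) (hpre : Pre_sanitize_text_block_py text) : pvOK text.toList := by
  intro c hc hcontra
  have h := hpre c hc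
  rw [← PySem.Str.isIn_iff_infix] at hcontra
  rw [hcontra] at h
  exact Bool.noConfusion h

set_option maxHeartbeats 1000000 in
theorem sanitize_text_block_py_spec : Claim_equal_sanitize_text_block_py := by
  intro text _ hpre
  unfold Spec_sanitize_text_block_py sanitize_text_block_py_alt
  rw [pv_A_char]
  exact congrArg String.ofList (pv_main _ pv_good_concrete _ (pv_okify text hpre))
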